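-- pv_equiv track=rewrite | github.com/rbuchmeier/nordicNumbers | src/scripts/validate_race_file.py | fix_header
-- ===== SOURCE A (Python) =====
-- def fix_header(header):
--     field_alterations = {
--         'first': ['first', 'first name'],
--         'last': ['last', 'last name'],
--         'team': ['team'],
--         'gender': ['sex', 'gender'],
--         'start': ['start', 'start time'],
--         'finish': ['finish', 'finish time'],
--         'time': ['time', 'total time'],
--         'grade': ['grade', 'class']
--     }
--     for field_type in field_alterations:
--         if header.lower() in field_alterations[field_type]:
--             return field_type
--     return header
-- ===== SOURCE B (Python) =====
-- def fix_header(header):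
--     h = header.lower()
--     exceptions = {'sex': 'gender', 'class': 'grade', 'total time': 'time'}
--     if h in exceptions:
--         return exceptions[h]
--     base, sep, rest = h.partition(' ')
--     if sep == '':
--         return base if base in ('first', 'last', 'team', 'gender',
--                                 'start', 'finish', 'time', 'grade') else header
--     if (rest == 'name' and base in ('first', 'last')) or \
--        (rest == 'time' and base in ('start', 'finish')):
--         return base
--     return header
-- ===== Notes on version B (the rewrite author's own statement) =====
-- stated objective: alternative
-- what changed: Replaces the alias-table scan by structural parsing: lowercase, handle the three irregular aliases, then split the header at its first space and accept either a bare canonical field name or a canonical base followed by its regular suffix word.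
import Mathlib
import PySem

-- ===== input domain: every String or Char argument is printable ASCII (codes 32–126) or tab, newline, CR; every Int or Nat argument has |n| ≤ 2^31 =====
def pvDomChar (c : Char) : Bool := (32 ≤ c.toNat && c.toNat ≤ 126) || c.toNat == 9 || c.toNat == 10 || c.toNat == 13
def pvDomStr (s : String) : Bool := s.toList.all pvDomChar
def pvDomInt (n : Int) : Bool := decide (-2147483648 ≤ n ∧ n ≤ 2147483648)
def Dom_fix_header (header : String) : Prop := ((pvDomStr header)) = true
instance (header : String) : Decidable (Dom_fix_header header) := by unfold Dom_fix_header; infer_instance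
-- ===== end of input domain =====

-- B drops A's alias table: it parses the header structurally (irregular aliases, then split at the
-- first space and accept a canonical base with an optional regular suffix word); alternative, same cost.

-- ===== PORT A =====
def fieldAlterationsA : List (String × List String) :=
  [("first", ["first", "first name"]),
   ("last", ["last", "last name"]),
   ("team", ["team"]),
   ("gender", ["sex", "gender"]),
   ("start", ["start", "start time"]),
   ("finish", ["finish", "finish time"]),
   ("time", ["time", "total time"]),
   ("grade", ["grade", "class"])]

-- the for-loop over the dict's fields with early return
def fixHeaderLoop (header : String) : List (String × List String) → String
  | [] => header
  | (fieldType, aliases) :: rest =>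
      if (PySem.Str.lower header) ∈ aliases then fieldType
      else fixHeaderLoop header rest

def fix_header (header : String) : String :=
  fixHeaderLoop header fieldAlterationsA

-- ===== PORT B =====
-- hand port of str.partition(' ') on the char list: split at the FIRST space (exact: ASCII ' ' only)
def partSpace : List Char → Option (List Char × List Char)
  | [] => none
  | c :: cs =>
      if c = ' ' then some ([], cs)
      else (partSpace cs).map (fun p => (c :: p.1, p.2))

-- h.partition(' ') as the (before, sep, after) triple Python returns
def pyPartitionSpace (s : String) : String × String × String :=
  match partSpace s.toList with
  | none => (s, "", "")
  | some (a, b) => (String.ofList a, " ", String.ofList b)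

def exceptionsB : PySem.Dict String String :=
  PySem.Dict.mk [("sex", "gender"), ("class", "grade"), ("total time", "time")]

def fix_header_alt (header : String) : String :=
  let h := PySem.Str.lower header
  match PySem.Dict.get? exceptionsB h with
  | some v => v
  | none =>
    let p := pyPartitionSpace h
    let base := p.1
    let sep := p.2.1
    let rest := p.2.2
    if sep = "" then
      if base ∈ ["first", "last", "team", "gender", "start", "finish", "time", "grade"]
      then base else header
    else if (rest = "name" ∧ (base = "first" ∨ base = "last")) ∨
            (rest = "time" ∧ (base = "start" ∨ base = "finish")) then base
    else header

-- ===== PRECONDITION & SPEC =====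
def Spec_fix_header (header : String) (out : String) : Prop := out = fix_header_alt header
instance (header : String) (out : String) : Decidable (Spec_fix_header header out) := by unfold Spec_fix_header; infer_instance

-- ===== CLAIM (what is proved, stated in full; the proofs are below) =====
def Claim_equal_fix_header : Prop := ∀ (header : String), Dom_fix_header header → Spec_fix_header header (fix_header header)

-- ===== LEMMAS AND PROOFS =====

theorem partSpace_some {cs a b : List Char} (h : partSpace cs = some (a, b)) :
    cs = a ++ ' ' :: b := by
  induction cs generalizing a b with
  | nil => simp [partSpace] at h
  | cons c cs ih =>
    simp only [partSpace] at h
    split at h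
    · next hc => cases h; simp [hc]
    · next hc =>
      cases hp : partSpace cs with
      | none => rw [hp] at h; simp at h
      | some p =>
        rw [hp] at h
        cases p with
        | mk pa pb =>
          simp at h
          obtain ⟨h1, h2⟩ := h
          subst h2
          rw [← h1]
          simp [ih hp]

theorem loop_eq_alt (header : String) :
    fixHeaderLoop header fieldAlterationsA = fix_header_alt header := by
  unfold fix_header_alt
  simp only [fieldAlterationsA, fixHeaderLoop]
  generalize PySem.Str.lower header = l
  rcases eq_or_ne l "first" with h|h1
  · subst h; rfl
  rcases eq_or_ne l "first name" with h|h2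
  · subst h; rfl
  rcases eq_or_ne l "last" with h|h3
  · subst h; rfl
  rcases eq_or_ne l "last name" with h|h4
  · subst h; rfl
  rcases eq_or_ne l "team" with h|h5
  · subst h; rfl
  rcases eq_or_ne l "sex" with h|h6
  · subst h; rfl
  rcases eq_or_ne l "gender" with h|h7
  · subst h; rfl
  rcases eq_or_ne l "start" with h|h8
  · subst h; rfl
  rcases eq_or_ne l "start time" with h|h9
  · subst h; rfl
  rcases eq_or_ne l "finish" with h|h10
  · subst h; rfl
  rcases eq_or_ne l "finish time" with h|h11
  · subst h; rfl
  rcases eq_or_ne l "time" with h|h12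
  · subst h; rfl
  rcases eq_or_ne l "total time" with h|h13
  · subst h; rfl
  rcases eq_or_ne l "grade" with h|h14
  · subst h; rfl
  rcases eq_or_ne l "class" with h|h15
  · subst h; rfl
  -- miss: A returns header; show B does too
  simp only [List.mem_cons, List.not_mem_nil, or_false]
  rw [show (if l = "first" ∨ l = "first name" then "first"
      else if l = "last" ∨ l = "last name" then "last"
      else if l = "team" then "team"
      else if l = "sex" ∨ l = "gender" then "gender"
      else if l = "start" ∨ l = "start time" then "start"
      else if l = "finish" ∨ l = "finish time" then "finish"
      else if l = "time" ∨ l = "total time" then "time"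
      else if l = "grade" ∨ l = "class" then "grade"
      else header) = header from by simp [h1,h2,h3,h4,h5,h6,h7,h8,h9,h10,h11,h12,h13,h14,h15]]
  -- exceptions lookup misses
  have hex : PySem.Dict.get? exceptionsB l = none := by
    simp [exceptionsB, PySem.Dict.get?,
      Ne.symm h6, Ne.symm h15, Ne.symm h13]
  rw [hex]
  cases hp : partSpace l.toList with
  | none =>
    -- no space: base = l, and l is none of the eight bare names
    have hb : pyPartitionSpace l = (l, "", "") := by simp [pyPartitionSpace, hp]
    simp [hb, h1, h3, h5, h7, h8, h10, h12, h14]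
  | some p =>
    cases p with
    | mk a b =>
      have hl : l.toList = a ++ ' ' :: b := partSpace_some hp
      have hb : pyPartitionSpace l = (String.ofList a, " ", String.ofList b) := by
        simp [pyPartitionSpace, hp]
      rw [hb]
      simp only
      rw [if_neg (by simp)]
      rw [if_neg ?_]
      rintro (⟨hr, hba⟩ | ⟨hr, hba⟩)
      · have hbl : b = "name".toList := by
          have := congrArg String.toList hr; simpa [String.toList_ofList] using this
        rcases hba with hba | hba
        · exact h2 (by apply String.toList_inj.mp
                       rw [hl, hbl, show a = "first".toList from by
                         have := congrArg String.toList hba; simpa [String.toList_ofList] using this]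
                       rfl)
        · exact h4 (by apply String.toList_inj.mp
                       rw [hl, hbl, show a = "last".toList from by
                         have := congrArg String.toList hba; simpa [String.toList_ofList] using this]
                       rfl)
      · have hbl : b = "time".toList := by
          have := congrArg String.toList hr; simpa [String.toList_ofList] using this
        rcases hba with hba | hba
        · exact h9 (by apply String.toList_inj.mp
                       rw [hl, hbl, show a = "start".toList from by
                         have := congrArg String.toList hba; simpa [String.toList_ofList] using this]
                       rfl)
        · exact h11 (by apply String.toList_inj.mp
                        rw [hl, hbl, show a = "finish".toList from by
                          have := congrArg String.toList hba; simpa [String.toList_ofList] using this]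
                        rfl)

-- ===== VERDICT (by name: the statement is the Claim_ definition above) =====
theorem fix_header_spec : Claim_equal_fix_header := by
  intro header _
  unfold Spec_fix_header fix_header
  exact loop_eq_alt header
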